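-- pv_equiv track=rewrite | github.com/kamazoun/algorithms | cci/5.3.flip_bit_to_win.py | flip_to_win_algorithmic
-- ===== SOURCE A (Python) =====
-- import math
--
-- def flip_to_win_algorithmic(n: int) -> int:
--     R'''
--     Author's: One of the most beautiful algorithms I have seen.
--     O(log(b)) time and O(1) space. b: number of bits to represent n
--     '''
--     assert n >= 0, 'Provide a positive integer please' # No parentheses in python asserts?
--     # Very important base case, if not alg doesn't work
--     if (~n) == 0: # All 1s
--         return len(get_bit_array(n))
--
--     current_len = previous_len = 0
--     max_len = 1
--
--     while n != 0:
--         if (n & 1) == 1: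
--             current_len += 1
--         elif (n & 1) == 0:
--             previous_len = 0 if (n & 2 == 0) else current_len
--             current_len = 0
--         max_len = max(max_len, current_len + previous_len + 1) # +1 because there will always be a 0 in the bit_array representing n.
--         n >>= 1
--
--     return max_len
--
-- def get_bit_array(n):
--     R'''
--     Helper function
--
--     bit_array = [0] * (int(math.log2(n)) + 1)
--     k = 0
--     while n > 0:
--         bit_array[k] = n % 2
--         n = n // 2
--         k += 1
--
--     return bit_array
--     '''
--     bit_array = [0] * (int(math.log2(n)) + 1)
--     while n > 0:
--         b = int(math.log2(n))
--         bit_array[b] = 1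
--         n -= 2**b
--
--     return bit_array
-- ===== SOURCE B (Python) =====
-- def flip_to_win_algorithmic(n: int) -> int:
--     assert n >= 0, 'Provide a positive integer please'
--     groups = ('0' + bin(n)[2:]).split('0')
--     best = 1
--     for a, b in zip(groups, groups[1:]):
--         best = max(best, len(a) + len(b) + 1)
--     return best
-- ===== Notes on version B (the rewrite author's own statement) =====
-- stated objective: simpler
-- what changed: Replaces A's stateful bit-by-bit scan (current/previous run counters with a look-ahead at the next bit) by building the 1-run structure explicitly with ('0' + bin(n)[2:]).split('0') and taking the maximum of len(a)+len(b)+1 over adjacent run pairs.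
import Mathlib
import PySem

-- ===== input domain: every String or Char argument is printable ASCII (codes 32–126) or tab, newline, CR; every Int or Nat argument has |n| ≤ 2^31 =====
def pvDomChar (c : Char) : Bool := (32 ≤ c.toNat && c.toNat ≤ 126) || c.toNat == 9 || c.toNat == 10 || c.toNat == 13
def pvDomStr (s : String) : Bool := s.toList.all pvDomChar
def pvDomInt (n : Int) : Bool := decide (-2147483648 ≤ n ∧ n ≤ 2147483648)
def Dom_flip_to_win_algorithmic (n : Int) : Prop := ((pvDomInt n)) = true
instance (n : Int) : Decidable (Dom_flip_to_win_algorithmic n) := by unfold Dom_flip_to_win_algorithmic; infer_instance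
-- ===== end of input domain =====

-- B rebuilds the run-length structure from the binary string and scans adjacent 1-run pairs,
-- replacing A's stateful bit-by-bit loop (objective: simpler decomposition, same cost).

-- ===== PORT A =====
-- the while loop of A; n is kept as a Nat (A's n is ≥ 0 past the assert), cur/prev/maxl as Int.
-- For n ≥ 0: Python's `n & 1 == 1` is `n % 2 = 1`, `n & 2 == 0` is `n / 2 % 2 = 0`, `n >>= 1` is `n := n / 2`.
def loopA (n : Nat) (cur prev maxl : Int) : Int :=
  if h : n = 0 then maxl
  else
    let cur' : Int := if n % 2 = 1 then cur + 1 else 0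
    let prev' : Int := if n % 2 = 1 then prev else (if n / 2 % 2 = 0 then 0 else cur)
    loopA (n / 2) cur' prev' (max maxl (cur' + prev' + 1))
termination_by n
decreasing_by exact Nat.div_lt_self (Nat.pos_of_ne_zero h) (by norm_num)

def flip_to_win_algorithmic (n : Int) : Int :=
  if n < 0 then 0                 -- `assert n >= 0` raises AssertionError: excluded by Pre_
  else if -n - 1 = 0 then 0       -- Python `(~n) == 0`: unreachable for n ≥ 0 (would require n = -1)
  else loopA n.toNat 0 0 1

-- ===== PORT B =====
-- bin(n)[2:] as a char list (MSB first); bin(0)[2:] = "0" is handled at the call site like Python's bin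
def binGo (n : Nat) : List Char :=
  if n = 0 then [] else binGo (n / 2) ++ [if n % 2 = 1 then '1' else '0']
termination_by n
decreasing_by exact Nat.div_lt_self (Nat.pos_of_ne_zero (by assumption)) (by norm_num)

def flip_to_win_algorithmic_alt (n : Int) : Int :=
  if n < 0 then 0                 -- `assert n >= 0` raises AssertionError: excluded by Pre_
  else
    -- s = '0' + bin(n)[2:]; groups = s.split('0')  (str.split with a one-char sep = List.splitOn)
    let s : List Char := '0' :: (if n = 0 then ['0'] else binGo n.toNat)
    let groups := s.splitOn '0'
    -- for a, b in zip(groups, groups[1:]): best = max(best, len(a) + len(b) + 1)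
    (groups.zip (groups.drop 1)).foldl
      (fun best ab => max best ((ab.1.length : Int) + (ab.2.length : Int) + 1)) 1

-- ===== PRECONDITION & SPEC =====
-- Pre_ excludes exactly the inputs where A's `assert n >= 0` raises AssertionError.
def Pre_flip_to_win_algorithmic (n : Int) : Prop := 0 ≤ n
instance (n : Int) : Decidable (Pre_flip_to_win_algorithmic n) := by unfold Pre_flip_to_win_algorithmic; infer_instance
def pvWitness_flip_to_win_algorithmic : Int := 9

def Spec_flip_to_win_algorithmic (n : Int) (out : Int) : Prop := out = flip_to_win_algorithmic_alt n
instance (n : Int) (out : Int) : Decidable (Spec_flip_to_win_algorithmic n out) := by unfold Spec_flip_to_win_algorithmic; infer_instance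

-- ===== CLAIM (what is proved, stated in full; the proofs are below) =====
def Claim_equal_flip_to_win_algorithmic : Prop := ∀ (n : Int), Dom_flip_to_win_algorithmic n → Pre_flip_to_win_algorithmic n → Spec_flip_to_win_algorithmic n (flip_to_win_algorithmic n)

-- ===== LEMMAS AND PROOFS =====

-- proof-side vocabulary: bits of n (LSB first), 1-run lengths, adjacent-pair values
def bitChar (b : Bool) : Char := if b then '1' else '0'

def bitsN (n : Nat) : List Bool :=
  if n = 0 then [] else (n % 2 == 1) :: bitsN (n / 2)
termination_by n
decreasing_by exact Nat.div_lt_self (Nat.pos_of_ne_zero (by assumption)) (by norm_num)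

def addHead (c : Int) : List Int → List Int
  | [] => []
  | x :: t => (x + c) :: t

def incLast : List Int → List Int
  | [] => []
  | [x] => [x + 1]
  | x :: y :: t => x :: incLast (y :: t)

def runs : List Bool → List Int
  | [] => [0]
  | true :: L => addHead 1 (runs L)
  | false :: L => 0 :: runs L

def adj : List Int → List Int
  | x :: y :: t => (x + y + 1) :: adj (y :: t)
  | _ => []

def steps : List Bool → Int → Int → List Int
  | [], _, _ => []
  | b :: L, c, p =>
    let c' : Int := if b then c + 1 else 0
    let p' : Int := if b then p else (if L.head?.getD false then c else 0)
    (c' + p' + 1) :: steps L c' p'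

def LS (cs : List Char) : List Int := (cs.splitOn '0').map (fun g => (g.length : Int))

-- foldl max toolkit
lemma foldl_max_pull (X : List Int) : ∀ (m y : Int), X.foldl max (max m y) = max (X.foldl max m) y := by
  induction X with
  | nil => intro m y; rfl
  | cons x X ih =>
    intro m y
    simp only [List.foldl_cons]
    rw [max_right_comm, ih]

lemma le_foldl_max (X : List Int) : ∀ (m : Int), m ≤ X.foldl max m := by
  induction X with
  | nil => intro m; exact le_refl m
  | cons x X ih =>
    intro m
    exact le_trans (le_max_left m x) (ih (max m x))

lemma mem_le_foldl_max {a : Int} (X : List Int) (m : Int) (h : a ∈ X) : a ≤ X.foldl max m := by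
  induction X generalizing m with
  | nil => cases h
  | cons x X ih =>
    rcases List.mem_cons.mp h with rfl | h'
    · exact le_trans (le_max_right m a) (le_foldl_max X _)
    · exact ih _ h'

lemma foldl_max_absorb_base {y m : Int} (X : List Int) (h : y ≤ m) : X.foldl max (max m y) = X.foldl max m := by
  rw [max_eq_left h]

lemma foldl_max_absorb_mem {y a m : Int} (X : List Int) (ha : a ∈ X) (h : y ≤ a) :
    X.foldl max (max m y) = X.foldl max m := by
  rw [foldl_max_pull]
  exact max_eq_left (h.trans (mem_le_foldl_max X m ha))

lemma foldl_max_reverse (X : List Int) : ∀ (m : Int), X.reverse.foldl max m = X.foldl max m := by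
  induction X with
  | nil => intro m; rfl
  | cons x X ih =>
    intro m
    simp only [List.reverse_cons, List.foldl_append, List.foldl_cons, List.foldl_nil]
    rw [ih, ← foldl_max_pull]

-- runs facts
lemma runs_ne_nil (L : List Bool) : runs L ≠ [] := by
  induction L with
  | nil => simp [runs]
  | cons b L ih =>
    cases b with
    | true =>
      cases hr : runs L with
      | nil => exact absurd hr ih
      | cons r t => simp [runs, hr, addHead]
    | false => simp [runs]

lemma runs_nonneg (L : List Bool) : ∀ x ∈ runs L, 0 ≤ x := by
  induction L with
  | nil => intro x hx; simp [runs] at hx; omega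
  | cons b L ih =>
    cases b with
    | true =>
      cases hr : runs L with
      | nil => exact absurd hr (runs_ne_nil L)
      | cons r t =>
        intro x hx
        simp [runs, hr, addHead] at hx
        rcases hx with rfl | hx
        · have := ih r (by rw [hr]; exact List.mem_cons_self ..)
          omega
        · exact ih x (by rw [hr]; exact List.mem_cons_of_mem _ hx)
    | false =>
      intro x hx
      simp [runs] at hx
      rcases hx with rfl | hx
      · omega
      · exact ih x hx

lemma addHead_zero (X : List Int) : addHead 0 X = X := by
  cases X <;> simp [addHead]

-- CORE: A's loop tail equals the adjacent-pair maximum over the (virtually extended) run list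
lemma core (L : List Bool) : ∀ (c p m : Int), 0 ≤ c → 0 ≤ p → c + p + 1 ≤ m →
    (steps L c p).foldl max m = (adj (p :: addHead c (runs L) ++ [0])).foldl max m := by
  induction L with
  | nil =>
    intro c p m hc hp hm
    simp only [steps, List.foldl_nil, runs, addHead, adj, List.cons_append, List.nil_append,
      List.foldl_cons]
    rw [max_eq_left (by omega), max_eq_left (by omega)]
  | cons b L ih =>
    intro c p m hc hp hm
    obtain ⟨r, t, hr⟩ : ∃ r t, runs L = r :: t :=
      List.exists_cons_of_ne_nil (runs_ne_nil L)
    have hr0 : 0 ≤ r := runs_nonneg L r (by rw [hr]; exact List.mem_cons_self ..)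
    cases b with
    | true =>
      simp only [steps, List.foldl_cons, if_true]
      rw [ih (c + 1) p (max m (c + 1 + p + 1)) (by omega) hp (by omega)]
      -- absorb the step value into the first adjacent pair
      simp only [runs, hr, addHead, List.cons_append]
      rw [show r + 1 + c = r + (c + 1) from by ring]
      have e1 : adj (p :: (r + (c + 1)) :: (t ++ [0]))
          = (p + (r + (c + 1)) + 1) :: adj ((r + (c + 1)) :: (t ++ [0])) := rfl
      exact foldl_max_absorb_mem (a := p + (r + (c + 1)) + 1) _
        (by rw [e1]; exact List.mem_cons_self ..) (by omega)
    | false =>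
      simp only [steps, Bool.false_eq_true, if_false, List.foldl_cons]
      cases hh : L.head?.getD false with
      | true =>
        -- the next bit is a 1: prev becomes cur, the bridged pair appears in adj
        have hcond : (if (true : Bool) = true then c else (0 : Int)) = c := by simp
        rw [hcond]
        rw [ih 0 c (max m (0 + c + 1)) le_rfl hc (by omega)]
        simp only [runs, hr, addHead, add_zero, List.cons_append]
        have e2 : adj (c :: r :: (t ++ [0])) = (c + r + 1) :: adj (r :: (t ++ [0])) := rfl
        have e1 : adj (p :: (0 + c) :: r :: (t ++ [0]))
            = (p + (0 + c) + 1) :: adj ((0 + c) :: r :: (t ++ [0])) := rfl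
        have e3 : adj ((0 + c) :: r :: (t ++ [0])) = ((0 + c) + r + 1) :: adj (r :: (t ++ [0])) := rfl
        rw [e2, e1, e3]
        simp only [List.foldl_cons]
        rw [max_right_comm m (0 + c + 1) (c + r + 1),
          foldl_max_absorb_base _ (le_trans (by omega) (le_max_right m (c + r + 1))),
          max_eq_left (by omega : p + (0 + c) + 1 ≤ m),
          show (0 + c) + r + 1 = c + r + 1 from by ring]
      | false =>
        -- the next bit is absent or a 0: runs L starts with 0
        have ht0 : ∃ t0, runs L = 0 :: t0 := by
          cases L with
          | nil => exact ⟨[], rfl⟩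
          | cons b' L' =>
            cases b' with
            | true => simp [List.head?] at hh
            | false => exact ⟨runs L', rfl⟩
        obtain ⟨t0, hrt⟩ := ht0
        have hcond : (if (false : Bool) = true then c else (0 : Int)) = 0 := by simp
        rw [hcond]
        rw [ih 0 0 (max m (0 + 0 + 1)) le_rfl le_rfl (by omega)]
        rw [max_eq_left (by omega)]
        simp only [runs, hrt, addHead, add_zero, List.cons_append]
        have e1 : adj (0 :: 0 :: (t0 ++ [0])) = (0 + 0 + 1) :: adj (0 :: (t0 ++ [0])) := rfl
        have e2 : adj (p :: (0 + c) :: 0 :: (t0 ++ [0]))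
            = (p + (0 + c) + 1) :: adj ((0 + c) :: 0 :: (t0 ++ [0])) := rfl
        have e3 : adj ((0 + c) :: 0 :: (t0 ++ [0]))
            = ((0 + c) + 0 + 1) :: adj (0 :: (t0 ++ [0])) := rfl
        rw [e1, e2, e3]
        simp only [List.foldl_cons]
        rw [max_eq_left (by omega), max_eq_left (by omega), max_eq_left (by omega)]

lemma head_bitsN (n : Nat) : (bitsN n).head?.getD false = (n % 2 == 1) := by
  rw [bitsN]
  by_cases h : n = 0
  · subst h; rfl
  · rw [if_neg h]; rfl

lemma loopA_steps (n : Nat) : ∀ (c p m : Int), loopA n c p m = (steps (bitsN n) c p).foldl max m := by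
  induction n using Nat.strong_induction_on with
  | _ n ih =>
    intro c p m
    by_cases h : n = 0
    · subst h; rw [loopA, bitsN]; rfl
    · rw [loopA, bitsN, if_neg h, dif_neg h]
      simp only [steps, List.foldl_cons, head_bitsN]
      rw [ih (n / 2) (Nat.div_lt_self (Nat.pos_of_ne_zero h) (by norm_num))]
      rcases Nat.mod_two_eq_zero_or_one n with hm | hm <;>
        rcases Nat.mod_two_eq_zero_or_one (n / 2) with hm2 | hm2 <;>
          simp [hm, hm2]

-- B-side: run-length structure of the split
lemma LS_nil : LS [] = [0] := by simp [LS, List.splitOn]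
lemma LS_cons0 (cs : List Char) : LS ('0' :: cs) = 0 :: LS cs := by
  simp [LS, List.splitOn, List.splitOnP_cons]
lemma LS_cons1 (c : Char) (cs : List Char) (h : ¬ (c == '0')) : LS (c :: cs) = addHead 1 (LS cs) := by
  have hs : (c :: cs).splitOn '0' = (cs.splitOn '0').modifyHead (List.cons c) := by
    simp [List.splitOn, List.splitOnP_cons, h]
  unfold LS
  rw [hs]
  cases cs.splitOn '0' with
  | nil => rfl
  | cons g t =>
    simp [List.modifyHead, addHead]
lemma LS_ne_nil (cs : List Char) : LS cs ≠ [] := by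
  induction cs with
  | nil => simp [LS_nil]
  | cons c cs ih =>
    by_cases h : c == '0'
    · have : c = '0' := by simpa using h
      subst this; simp [LS_cons0]
    · rw [LS_cons1 c cs h]
      cases hc : LS cs with
      | nil => exact absurd hc ih
      | cons x t => simp [addHead]

lemma addHead_incLast (X : List Int) : addHead 1 (incLast X) = incLast (addHead 1 X) := by
  match X with
  | [] => rfl
  | [x] => simp [incLast, addHead]
  | x :: y :: t => simp [incLast, addHead]

lemma incLast_append (t : List Int) (x : Int) : incLast (t ++ [x]) = t ++ [x + 1] := by
  induction t with
  | nil => rfl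
  | cons a t ih =>
    cases t with
    | nil => simp [incLast]
    | cons b t' => simpa [incLast] using ih

lemma LS_append (cs : List Char) (c : Char) :
    LS (cs ++ [c]) = if c = '0' then LS cs ++ [0] else incLast (LS cs) := by
  induction cs with
  | nil =>
    by_cases h : c = '0'
    · subst h; simp [LS_cons0, LS_nil]
    · simp only [List.nil_append]
      rw [if_neg h, LS_cons1 c [] (by simpa using h), LS_nil]; rfl
  | cons d cs ih =>
    by_cases hd : d = '0'
    · subst hd
      rw [List.cons_append, LS_cons0, ih, LS_cons0]
      by_cases hc : c = '0'
      · simp [hc]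
      · rw [if_neg hc, if_neg hc]
        cases hL : LS cs with
        | nil => exact absurd hL (LS_ne_nil cs)
        | cons x t => simp [incLast]
    · rw [List.cons_append, LS_cons1 d _ (by simpa using hd), ih, LS_cons1 d _ (by simpa using hd)]
      by_cases hc : c = '0'
      · rw [if_pos hc, if_pos hc]
        cases hL : LS cs with
        | nil => exact absurd hL (LS_ne_nil cs)
        | cons x t => simp [addHead]
      · rw [if_neg hc, if_neg hc, addHead_incLast]

lemma LS_reverse (cs : List Char) : LS cs.reverse = (LS cs).reverse := by
  induction cs with
  | nil => simp [LS_nil]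
  | cons c cs ih =>
    rw [List.reverse_cons, LS_append, ih]
    by_cases hc : c = '0'
    · subst hc; simp [LS_cons0]
    · rw [if_neg hc, LS_cons1 c cs (by simpa using hc)]
      cases hL : LS cs with
      | nil => exact absurd hL (LS_ne_nil cs)
      | cons x t => simp [addHead, incLast_append]

lemma LS_map_bitChar (L : List Bool) : LS (L.map bitChar) = runs L := by
  induction L with
  | nil => simp [LS_nil, runs]
  | cons b L ih =>
    cases b with
    | true =>
      have : bitChar true ≠ '0' := by decide
      rw [List.map_cons, LS_cons1 _ _ (by simpa using this), ih]; rfl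
    | false =>
      have : bitChar false = '0' := by decide
      rw [List.map_cons, this, LS_cons0, ih]; rfl

lemma binGo_reverse (n : Nat) : (binGo n).reverse = (bitsN n).map bitChar := by
  induction n using Nat.strong_induction_on with
  | _ n ih =>
    by_cases h : n = 0
    · subst h; rw [binGo, bitsN]; simp
    · rw [binGo, bitsN, if_neg h, if_neg h]
      simp only [List.reverse_append, List.reverse_cons, List.reverse_nil, List.nil_append,
        List.map_cons]
      rw [ih (n / 2) (Nat.div_lt_self (Nat.pos_of_ne_zero h) (by norm_num))]
      rcases Nat.mod_two_eq_zero_or_one n with hm | hm <;> simp [bitChar, hm]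

lemma LS_binGo (n : Nat) : LS (binGo n) = (runs (bitsN n)).reverse := by
  have h1 : binGo n = ((bitsN n).map bitChar).reverse := by
    rw [← binGo_reverse, List.reverse_reverse]
  rw [h1, LS_reverse, LS_map_bitChar]

-- zip-pair fold = foldl max over adj of the length list
lemma zip_fold_adj (gs : List (List Char)) : ∀ (b : Int),
    (gs.zip (gs.drop 1)).foldl (fun best ab => max best ((ab.1.length : Int) + (ab.2.length : Int) + 1)) b
      = (adj (gs.map (fun g => (g.length : Int)))).foldl max b := by
  induction gs with
  | nil => intro b; rfl
  | cons g t ih =>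
    intro b
    cases t with
    | nil => rfl
    | cons g2 t2 =>
      simp only [List.drop_succ_cons, List.drop_zero, List.zip_cons_cons, List.foldl_cons,
        List.map_cons, adj]
      exact ih _

lemma adj_append (xs : List Int) (h : xs ≠ []) (y : Int) :
    adj (xs ++ [y]) = adj xs ++ [xs.getLast?.getD 0 + y + 1] := by
  induction xs with
  | nil => exact absurd rfl h
  | cons x t ih =>
    cases t with
    | nil => simp [adj]
    | cons a t' =>
      have h2 := ih (by simp)
      simp only [List.cons_append] at h2 ⊢
      have e1 : adj (x :: (a :: (t' ++ [y]))) = (x + a + 1) :: adj (a :: (t' ++ [y])) := rfl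
      rw [e1, h2]
      have e2 : adj (x :: a :: t') = (x + a + 1) :: adj (a :: t') := rfl
      rw [e2]
      simp [List.getLast?_cons_cons]

lemma adj_reverse (X : List Int) : adj X.reverse = (adj X).reverse := by
  induction X with
  | nil => rfl
  | cons x t ih =>
    cases t with
    | nil => rfl
    | cons a t' =>
      rw [List.reverse_cons, adj_append _ (by simp) x, ih]
      simp [adj]
      omega

lemma bridge (r : Int) (t : List Int) (m : Int) (ht : ∀ x ∈ t, (0 : Int) ≤ x) :
    (adj (0 :: r :: (t ++ [0]))).foldl max m = (adj (r :: (t ++ [0]))).foldl max m := by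
  cases t with
  | nil =>
    simp only [List.nil_append]
    have e : adj (0 :: r :: [0]) = (0 + r + 1) :: adj (r :: [0]) := rfl
    rw [e, List.foldl_cons]
    exact foldl_max_absorb_mem (a := r + 0 + 1) _ (by simp [adj]) (by omega)
  | cons y t' =>
    have hy : 0 ≤ y := ht y (List.mem_cons_self ..)
    have e : adj (0 :: r :: (y :: t' ++ [0])) = (0 + r + 1) :: adj (r :: (y :: t' ++ [0])) := rfl
    have e2 : adj (r :: (y :: t' ++ [0])) = (r + y + 1) :: adj (y :: t' ++ [0]) := rfl
    rw [e, List.foldl_cons]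
    exact foldl_max_absorb_mem (a := r + y + 1) _ (by rw [e2]; exact List.mem_cons_self ..)
      (by omega)

-- ===== VERDICT (by name: the statement is the Claim_ definition above) =====
theorem flip_to_win_algorithmic_spec : Claim_equal_flip_to_win_algorithmic := by
  intro n hdom hpre
  unfold Spec_flip_to_win_algorithmic
  unfold Pre_flip_to_win_algorithmic at hpre
  by_cases h0 : n = 0
  · subst h0
    have hA : flip_to_win_algorithmic 0 = 1 := by
      rw [flip_to_win_algorithmic, if_neg (by norm_num), if_neg (by norm_num)]
      rw [show (0 : Int).toNat = 0 from rfl, loopA]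
      norm_num
    have hB : flip_to_win_algorithmic_alt 0 = 1 := by
      rw [flip_to_win_algorithmic_alt, if_neg (by norm_num)]
      norm_num [List.splitOn, List.splitOnP_cons, List.zip, List.zipWith, List.foldl]
    rw [hA, hB]
  · have hn : 0 < n := lt_of_le_of_ne hpre (Ne.symm h0)
    have hnn : n.toNat ≠ 0 := by omega
    obtain ⟨r, t, hrt⟩ : ∃ r t, runs (bitsN n.toNat) = r :: t :=
      List.exists_cons_of_ne_nil (runs_ne_nil _)
    have ht : ∀ x ∈ t, (0 : Int) ≤ x := fun x hx =>
      runs_nonneg (bitsN n.toNat) x (by rw [hrt]; exact List.mem_cons_of_mem r hx)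
    -- A's loop = adjacent-pair maximum over (runs ++ [0])
    have hA : flip_to_win_algorithmic n = (adj (r :: (t ++ [0]))).foldl max 1 := by
      rw [flip_to_win_algorithmic, if_neg (by omega), if_neg (by omega),
        loopA_steps, core _ 0 0 1 le_rfl le_rfl le_rfl, addHead_zero, hrt]
      simp only [List.cons_append]
      exact bridge r t 1 ht
    -- B's split-and-scan = the same adjacent-pair maximum
    have hB : flip_to_win_algorithmic_alt n = (adj (r :: (t ++ [0]))).foldl max 1 := by
      simp only [flip_to_win_algorithmic_alt, if_neg (by omega : ¬ n < 0), if_neg h0]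
      have hsplit : (('0' :: binGo n.toNat).splitOn '0') = [] :: ((binGo n.toNat).splitOn '0') := by
        simp [List.splitOn, List.splitOnP_cons]
      rw [hsplit, zip_fold_adj, List.map_cons,
        show (((binGo n.toNat).splitOn '0').map fun g => ((g.length : Int))) = LS (binGo n.toNat)
          from rfl,
        LS_binGo, List.length_nil, Nat.cast_zero]
      rw [show (0 : Int) :: (runs (bitsN n.toNat)).reverse
            = (runs (bitsN n.toNat) ++ [0]).reverse from by simp]
      rw [adj_reverse, foldl_max_reverse, hrt]
      simp only [List.cons_append]
    rw [hA, hB]
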